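-- pv_equiv track=rewrite | github.com/flamingosundae/Uni | Anno1/Programmazione/Lezione10/Esercizio10.py | rem_none
-- ===== SOURCE A (Python) =====
-- def rem_none(l):
--     '''
--     input: una lista, l.
--     output: la lista di input con tutti gli oggetti None rimossi.
--     '''
--     a = 0
--     while a < len(l):
--         if l[a] == None:
--             del(l[a])
--         else:
--             a += 1
--
--     return l
-- ===== SOURCE B (Python) =====
-- def rem_none(l):
--     '''
--     input: una lista, l.
--     output: la lista di input con tutti gli oggetti None rimossi.
--     '''
--     l[:] = [x for x in l if x is not None]
--     return l
-- ===== Notes on version B (the rewrite author's own statement) =====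
-- stated objective: faster
-- what changed: Replaces the quadratic while-loop with repeated in-place del by a single list-comprehension pass assigned back into l (same in-place mutation, order kept).
import Mathlib
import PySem

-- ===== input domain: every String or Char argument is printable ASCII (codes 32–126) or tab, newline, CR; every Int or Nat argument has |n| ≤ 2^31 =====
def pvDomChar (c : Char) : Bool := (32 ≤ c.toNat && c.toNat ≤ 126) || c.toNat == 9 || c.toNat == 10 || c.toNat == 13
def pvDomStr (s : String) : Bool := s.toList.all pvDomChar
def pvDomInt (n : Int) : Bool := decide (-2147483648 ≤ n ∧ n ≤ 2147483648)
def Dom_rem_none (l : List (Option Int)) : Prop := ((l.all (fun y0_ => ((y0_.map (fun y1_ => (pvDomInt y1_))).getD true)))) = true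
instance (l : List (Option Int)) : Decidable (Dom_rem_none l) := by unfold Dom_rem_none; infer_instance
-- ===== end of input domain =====

-- B replaces A's quadratic while-loop-with-del by one linear comprehension pass (objective: faster);
-- both A and B mutate the argument list in place in Python; the equivalence proved here is about the return value.
-- ===== PORT A =====
-- literal port of A's while loop: index a, 'del l[a]' = eraseIdx, else a += 1
def remNoneLoop (l : List (Option Int)) (a : Nat) : List (Option Int) :=
  if h : a < l.length then
    if l[a] = none then remNoneLoop (l.eraseIdx a) a
    else remNoneLoop l (a + 1)
  else l
termination_by l.length - a
decreasing_by
  · have := l.length_eraseIdx_of_lt h; omega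
  · omega

-- A returns the mutated Python list, whose elements are all ints; List Int per the type convention
def rem_none (l : List (Option Int)) : List Int :=
  (remNoneLoop l 0).filterMap id

-- ===== PORT B =====
-- [x for x in l if x is not None], written back and returned
def rem_none_alt (l : List (Option Int)) : List Int :=
  l.filterMap id

-- ===== PRECONDITION & SPEC =====
def Spec_rem_none (l : List (Option Int)) (out : List Int) : Prop := out = rem_none_alt l
instance (l : List (Option Int)) (out : List Int) : Decidable (Spec_rem_none l out) := by unfold Spec_rem_none; infer_instance

-- ===== CLAIM (what is proved, stated in full; the proofs are below) =====
def Claim_equal_rem_none : Prop := ∀ (l : List (Option Int)), Dom_rem_none l → Spec_rem_none l (rem_none l)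

-- ===== LEMMAS AND PROOFS =====
theorem remNoneLoop_eq (l : List (Option Int)) (a : Nat) :
    remNoneLoop l a = l.take a ++ (l.drop a).filter (·.isSome) := by
  fun_induction remNoneLoop l a with
  | case1 l a h hnone ih =>
      rw [ih, List.eraseIdx_eq_take_drop_succ]
      have ht : ((l.take a ++ l.drop (a+1)).take a) = l.take a := by
        rw [List.take_append_of_le_length (by simp; omega), List.take_take]
        simp
      have hd : ((l.take a ++ l.drop (a+1)).drop a) = l.drop (a+1) := by
        rw [List.drop_append_of_le_length (by simp; omega)]
        simp
      rw [ht, hd]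
      have : l.drop a = l[a] :: l.drop (a+1) := List.drop_eq_getElem_cons h
      rw [this, List.filter_cons]
      simp [hnone]
  | case2 l a h hnone ih =>
      rw [ih]
      have hdrop : l.drop a = l[a] :: l.drop (a+1) := List.drop_eq_getElem_cons h
      have htake : l.take (a+1) = l.take a ++ [l[a]] := by
        rw [List.take_add_one, List.getElem?_eq_getElem h]; rfl
      have hs : (l[a]).isSome = true := by
        cases h' : l[a] with
        | none => exact absurd h' hnone
        | some v => rfl
      rw [hdrop, List.filter_cons, htake]
      simp only [hs, if_pos]
      simp only [List.append_assoc, List.singleton_append]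
  | case3 l a h =>
      have : l.length ≤ a := by omega
      simp [List.take_of_length_le this, List.drop_of_length_le this]

theorem filterMap_id_filter (l : List (Option Int)) :
    (l.filter (·.isSome)).filterMap id = l.filterMap id := by
  induction l with
  | nil => rfl
  | cons x xs ih =>
      cases x <;> simp only [List.filter_cons, List.filterMap_cons, id, Option.isSome] <;> simpa using ih

-- ===== VERDICT (by name: the statement is the Claim_ definition above) =====
theorem rem_none_spec : Claim_equal_rem_none := by
  intro l _
  show rem_none l = rem_none_alt l
  unfold rem_none rem_none_alt
  rw [remNoneLoop_eq]
  simpa using filterMap_id_filter l
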